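-- pv_equiv track=rewrite | github.com/ComPWA/ampform | expertsystem/ui/default_settings.py | reorder_list_by_priority
-- ===== SOURCE A (Python) =====
-- from typing import (
--     Any,
--     Dict,
--     List,
-- )
--
-- def reorder_list_by_priority(
--     some_list: List[Any], priority_mapping: Dict[str, Any]
-- ) -> List[Any]:
--     # first add priorities to the entries
--     priority_list = [
--         (x, priority_mapping[str(x)]) if str(x) in priority_mapping else (x, 1)
--         for x in some_list
--     ]
--     # then sort according to priority
--     sorted_list = sorted(priority_list, key=lambda x: x[1], reverse=True)
--     # and strip away the priorities again
--     return [x[0] for x in sorted_list]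
-- ===== SOURCE B (Python) =====
-- def reorder_list_by_priority(some_list, priority_mapping):
--     # group elements into priority buckets (insertion order inside each bucket),
--     # then emit the buckets by descending priority
--     buckets = {}
--     for x in some_list:
--         p = priority_mapping[str(x)] if str(x) in priority_mapping else 1
--         buckets.setdefault(p, []).append(x)
--     result = []
--     for p in sorted(buckets, reverse=True):
--         result += buckets[p]
--     return result
-- ===== Notes on version B (the rewrite author's own statement) =====
-- stated objective: alternative
-- what changed: Replaces the decorate/stable-key-sort/undecorate pipeline by a group-then-merge: elements are bucketed in a dict keyed by priority (input order kept inside each bucket) and the buckets are concatenated in descending order of the distinct priorities.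
import Mathlib
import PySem

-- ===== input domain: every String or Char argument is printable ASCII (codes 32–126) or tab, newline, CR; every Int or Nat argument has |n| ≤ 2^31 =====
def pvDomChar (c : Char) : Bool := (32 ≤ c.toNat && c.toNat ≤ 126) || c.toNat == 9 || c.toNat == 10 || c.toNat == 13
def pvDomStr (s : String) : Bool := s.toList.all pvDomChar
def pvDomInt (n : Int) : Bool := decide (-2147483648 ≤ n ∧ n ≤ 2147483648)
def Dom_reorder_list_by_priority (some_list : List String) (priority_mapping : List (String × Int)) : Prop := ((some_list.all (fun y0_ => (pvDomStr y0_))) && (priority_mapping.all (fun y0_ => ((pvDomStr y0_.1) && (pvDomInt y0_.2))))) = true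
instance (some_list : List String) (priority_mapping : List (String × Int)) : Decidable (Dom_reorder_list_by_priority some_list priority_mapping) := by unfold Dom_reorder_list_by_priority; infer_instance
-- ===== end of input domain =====

-- B replaces the decorate/stable-sort/undecorate pipeline by grouping into priority
-- buckets and concatenating them in descending priority order (objective: alternative).
-- ===== PORT A =====
def reorder_list_by_priority (some_list : List String) (priority_mapping : List (String × Int)) : List String :=
  -- first add priorities to the entries
  let priority_list := some_list.map (fun x =>
    if (PySem.Dict.mk priority_mapping).contains x then
      (x, (PySem.Dict.mk priority_mapping).getD x 1)
    else (x, 1))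
  -- then sort according to priority
  let sorted_list := PySem.List.sorted priority_list (fun x => x.2) true
  -- and strip away the priorities again
  sorted_list.map (fun x => x.1)

-- ===== PORT B =====
def reorder_list_by_priority_alt (some_list : List String) (priority_mapping : List (String × Int)) : List String :=
  let buckets := some_list.foldl (fun d x =>
    let p := if (PySem.Dict.mk priority_mapping).contains x then
               (PySem.Dict.mk priority_mapping).getD x 1
             else 1
    d.modify p [] (fun b => b ++ [x])) PySem.Dict.empty
  (PySem.List.sorted buckets.keys (fun k => k) true).foldl
    (fun acc p => acc ++ buckets.getD p []) []

-- ===== PRECONDITION & SPEC =====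
def Spec_reorder_list_by_priority (some_list : List String) (priority_mapping : List (String × Int)) (out : List String) : Prop := out = reorder_list_by_priority_alt some_list priority_mapping
instance (some_list : List String) (priority_mapping : List (String × Int)) (out : List String) : Decidable (Spec_reorder_list_by_priority some_list priority_mapping out) := by unfold Spec_reorder_list_by_priority; infer_instance

-- ===== CLAIM (what is proved, stated in full; the proofs are below) =====
def Claim_equal_reorder_list_by_priority : Prop := ∀ (some_list : List String) (priority_mapping : List (String × Int)), Dom_reorder_list_by_priority some_list priority_mapping → Spec_reorder_list_by_priority some_list priority_mapping (reorder_list_by_priority some_list priority_mapping)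

-- ===== LEMMAS AND PROOFS =====

-- the priority assigned to an element (vocabulary of the proofs only)
def pvPrio (pm : List (String × Int)) (x : String) : Int :=
  if (PySem.Dict.mk pm).contains x then (PySem.Dict.mk pm).getD x 1 else 1

theorem pv_insertBy_all_before {α : Type} (before : α → α → Bool) (x : α) (bs : List α)
    (h : ∀ b ∈ bs, before x b = true) :
    PySem.List.insertBy before x bs = x :: bs := by
  cases bs with
  | nil => rfl
  | cons b bs => simp [PySem.List.insertBy, h b (by simp)]

theorem pv_insertBy_append_not_before {α : Type} (before : α → α → Bool) (x : α)
    (as bs : List α) (h : ∀ a ∈ as, before x a = false) :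
    PySem.List.insertBy before x (as ++ bs) = as ++ PySem.List.insertBy before x bs := by
  induction as with
  | nil => rfl
  | cons a as ih =>
    simp only [List.cons_append, PySem.List.insertBy, h a (by simp)]
    simp only [Bool.false_eq_true, if_false]
    rw [ih (fun a ha => h a (by simp [ha]))]

-- inserting one decorated element into a concatenation of buckets with strictly
-- descending priorities appends it at the end of its own bucket
theorem pv_bucket_insert (x : String × Int) (ks : List Int) (G : Int → List (String × Int))
    (hks : ks.Pairwise (fun a b => b < a)) (hx : x.2 ∈ ks)
    (hG : ∀ p ∈ ks, ∀ e ∈ G p, e.2 = p) :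
    PySem.List.insertBy (fun a b => decide ((b : String × Int).2 < a.2)) x (ks.flatMap G)
      = ks.flatMap (fun p => G p ++ if x.2 = p then [x] else []) := by
  induction ks with
  | nil => simp at hx
  | cons k ks ih =>
    rcases List.pairwise_cons.1 hks with ⟨hk, hks'⟩
    simp only [List.flatMap_cons]
    by_cases hxk : x.2 = k
    · have hGk : ∀ e ∈ G k, (decide (e.2 < x.2) : Bool) = false := by
        intro e he
        have := hG k (by simp) e he
        simp [this, hxk]
      have htail : ∀ e ∈ ks.flatMap G, (decide (e.2 < x.2) : Bool) = true := by
        intro e he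
        rcases List.mem_flatMap.1 he with ⟨p, hp, hep⟩
        have h1 := hG p (by simp [hp]) e hep
        have hlt : p < k := hk p hp
        simp [h1, hxk]; omega
      rw [pv_insertBy_append_not_before _ _ _ _ hGk,
          pv_insertBy_all_before _ _ _ htail]
      have hrest : (ks.flatMap fun p => G p ++ if x.2 = p then [x] else []) = ks.flatMap G := by
        apply List.flatMap_congr
        intro p hp
        have : x.2 ≠ p := by have := hk p hp; omega
        simp [this]
      rw [hrest]
      simp [hxk]
    · have hx' : x.2 ∈ ks := by
        rcases List.mem_cons.1 hx with h | h
        · exact absurd h hxk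
        · exact h
      have hGk : ∀ e ∈ G k, (decide (e.2 < x.2) : Bool) = false := by
        intro e he
        have h1 := hG k (by simp) e he
        have hlt : x.2 < k := hk _ hx'
        simp [h1]; omega
      rw [pv_insertBy_append_not_before _ _ _ _ hGk,
          ih hks' hx' (fun p hp => hG p (by simp [hp]))]
      simp [hxk]

-- Python's stable descending key-sort IS the concatenation of the input-order
-- buckets along any strictly descending list of priorities covering the input
theorem pv_sorted_rev_buckets (pl : List (String × Int)) (ks : List Int)
    (hks : ks.Pairwise (fun a b => b < a)) (hmem : ∀ e ∈ pl, e.2 ∈ ks) :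
    PySem.List.sorted pl (fun e => e.2) true
      = ks.flatMap (fun p => pl.filter (fun e => e.2 == p)) := by
  induction pl using List.reverseRecOn with
  | nil => simp [PySem.List.sorted]
  | append_singleton l x ih =>
    rw [PySem.List.sorted_rev_eq_foldl_insertBy, List.foldl_append,
        ← PySem.List.sorted_rev_eq_foldl_insertBy]
    simp only [List.foldl_cons, List.foldl_nil]
    rw [ih (fun e he => hmem e (by simp [he]))]
    rw [pv_bucket_insert x ks _ hks (hmem x (by simp))
        (fun p hp e he => by simpa using (List.of_mem_filter he))]
    apply List.flatMap_congr
    intro p hp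
    by_cases h : x.2 = p <;> simp [List.filter_append, h]

-- keys of B's bucket dict: first occurrences of the priority sequence, in order
theorem pv_keys_buckets (some_list : List String) (pm : List (String × Int)) :
    (some_list.foldl (fun d x =>
        d.modify (pvPrio pm x) [] (fun b => b ++ [x])) PySem.Dict.empty).keys
      = PySem.List.dedup (some_list.map (pvPrio pm)) := by
  rw [PySem.Dict.keys_foldl_modify_key (key := pvPrio pm)
        (f := fun _ x => (fun b => b ++ [x])) (d0 := [])]
  simp [PySem.List.dedup_eq_ofList, PySem.Set.update, PySem.Set.ofList_eq_foldl,
        PySem.Dict.keys_empty]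

-- content of each bucket: the elements with that priority, in input order
theorem pv_getD_buckets (some_list : List String) (pm : List (String × Int)) (p : Int) :
    (some_list.foldl (fun d x =>
        d.modify (pvPrio pm x) [] (fun b => b ++ [x])) PySem.Dict.empty).getD p []
      = some_list.filter (fun x => pvPrio pm x == p) := by
  have h := PySem.Dict.getD_foldl_modify_append
      (l := some_list.map (fun x => (pvPrio pm x, x))) (d := PySem.Dict.empty) (c := p)
  rw [List.foldl_map, List.filter_map, List.map_map] at h
  simpa [Function.comp_def] using h

-- strictly descending distinct priorities
theorem pv_sorted_rev_id_pairwise (xs : List Int) (h : xs.Nodup) :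
    (PySem.List.sorted xs (fun k => k) true).Pairwise (fun a b => b < a) := by
  have h1 := PySem.List.sorted_pairwise_rev (xs := xs) (key := fun k => k)
  have h2 : (PySem.List.sorted xs (fun k => k) true).Nodup :=
    (PySem.List.sorted_perm xs (fun k => k) true).nodup_iff.2 h
  have := h1.and h2
  exact this.imp (fun {a b} hab => lt_of_le_of_ne hab.1 (fun e => hab.2 e.symm))

-- ===== VERDICT (by name: the statement is the Claim_ definition above) =====
theorem reorder_list_by_priority_spec : Claim_equal_reorder_list_by_priority := by
  intro some_list pm _
  show reorder_list_by_priority some_list pm = reorder_list_by_priority_alt some_list pm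
  unfold reorder_list_by_priority reorder_list_by_priority_alt
  simp only []
  -- name the shared pieces
  have hdecomp : (some_list.map (fun x =>
      if (PySem.Dict.mk pm).contains x then (x, (PySem.Dict.mk pm).getD x 1) else (x, 1)))
      = some_list.map (fun x => (x, pvPrio pm x)) := by
    apply List.map_congr_left
    intro x _
    unfold pvPrio
    by_cases h : (PySem.Dict.mk pm).contains x <;> simp [h]
  have e1 : (fun (d : PySem.Dict Int (List String)) (x : String) =>
      PySem.Dict.modify d
        (if (PySem.Dict.mk pm).contains x = true then (PySem.Dict.mk pm).getD x 1 else 1)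
        [] (fun b => b ++ [x]))
      = (fun d x => PySem.Dict.modify d (pvPrio pm x) [] (fun b => b ++ [x])) := rfl
  rw [hdecomp, e1, pv_keys_buckets]
  set ks := PySem.List.sorted (PySem.List.dedup (some_list.map (pvPrio pm))) (fun k => k) true with hksdef
  have hks : ks.Pairwise (fun a b => b < a) :=
    pv_sorted_rev_id_pairwise _ (PySem.List.nodup_dedup _)
  have hmem : ∀ e ∈ some_list.map (fun x => (x, pvPrio pm x)), e.2 ∈ ks := by
    intro e he
    rcases List.mem_map.1 he with ⟨x, hx, rfl⟩
    rw [hksdef, PySem.List.mem_sorted, PySem.List.mem_dedup]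
    exact List.mem_map_of_mem hx
  rw [pv_sorted_rev_buckets _ ks hks hmem]
  rw [PySem.List.foldl_append_eq_flatMap]
  simp only [List.nil_append, List.map_flatMap]
  apply List.flatMap_congr
  intro p hp
  rw [pv_getD_buckets, List.filter_map, List.map_map]
  simp [Function.comp_def]
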